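-- pv_equiv track=rewrite | github.com/SereneScarecrow/Hausa_lemmatizer | Hausa-lemmatizer.py | _combine_tokens
-- ===== SOURCE A (Python) =====
-- def _combine_tokens(tokens, original_text):
--     """
--     Объединяет токены, которые были разделены токенизатором
--     """
--     if not tokens:
--         return []
--
--     result = []
--     i = 0
--     original_lower = original_text.lower()
--
--     while i < len(tokens):
--         current = tokens[i]
--
--         # Если это не пунктуация, пытаемся объединить с последующими
--         if current['POS'] != 'PUNCT' and i + 1 < len(tokens):
--             combined_word = current['word']
--             combined_pos = current['POS']
--             j = i + 1
--
--             while j < len(tokens):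
--                 next_token = tokens[j]
--
--                 # Прерываем если встретили пунктуацию
--                 if next_token['POS'] == 'PUNCT':
--                     break
--
--                 test_combination = combined_word + next_token['word']
--
--                 # Проверяем есть ли комбинация в оригинальном тексте
--                 if test_combination.lower() in original_lower:
--                     combined_word = test_combination
--                     combined_pos = f"{combined_pos}+{next_token['POS']}"
--                     j += 1
--                 else:
--                     break
--
--             if j > i + 1:  # Было объединение
--                 result.append({
--                     'word': combined_word,
--                     'POS': combined_pos,
--                     'lemma': None
--                 })
--                 i = j
--                 continue
--
--         # Если объединения не было, добавляем текущий токен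
--         result.append(current)
--         i += 1
--
--     return result
-- ===== SOURCE B (Python) =====
-- def _combine_tokens(tokens, original_text):
--     """Single flat pass with a run buffer instead of an index loop with jumps."""
--     original_lower = original_text.lower()
--     result = []
--     buf = []        # current run of mergeable tokens
--     buf_word = ''   # concatenation of their words
--
--     def flush():
--         if len(buf) == 1:
--             result.append(buf[0])
--         elif buf:
--             result.append({'word': buf_word,
--                            'POS': '+'.join(f"{t['POS']}" for t in buf),
--                            'lemma': None})
--
--     for tok in tokens:
--         if tok['POS'] == 'PUNCT':
--             flush()
--             buf, buf_word = [], ''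
--             result.append(tok)
--         elif not buf:
--             buf, buf_word = [tok], tok['word']
--         elif (buf_word + tok['word']).lower() in original_lower:
--             buf.append(tok)
--             buf_word += tok['word']
--         else:
--             flush()
--             buf, buf_word = [tok], tok['word']
--     flush()
--     return result
-- ===== Notes on version B (the rewrite author's own statement) =====
-- stated objective: simpler
-- what changed: A's outer index loop with manual jumps plus a nested extension loop is replaced by one flat pass over the tokens that keeps a buffer of the current mergeable run and flushes it (original dict if one token, merged dict with f-string-joined POS if several) on PUNCT, on a failed concatenation test, and at the end.
-- outside the precondition, e.g. on _combine_tokens([{'POS': 'X'}], 'a'): A returns [{'POS': 'X'}], B raises KeyError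
import Mathlib
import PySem

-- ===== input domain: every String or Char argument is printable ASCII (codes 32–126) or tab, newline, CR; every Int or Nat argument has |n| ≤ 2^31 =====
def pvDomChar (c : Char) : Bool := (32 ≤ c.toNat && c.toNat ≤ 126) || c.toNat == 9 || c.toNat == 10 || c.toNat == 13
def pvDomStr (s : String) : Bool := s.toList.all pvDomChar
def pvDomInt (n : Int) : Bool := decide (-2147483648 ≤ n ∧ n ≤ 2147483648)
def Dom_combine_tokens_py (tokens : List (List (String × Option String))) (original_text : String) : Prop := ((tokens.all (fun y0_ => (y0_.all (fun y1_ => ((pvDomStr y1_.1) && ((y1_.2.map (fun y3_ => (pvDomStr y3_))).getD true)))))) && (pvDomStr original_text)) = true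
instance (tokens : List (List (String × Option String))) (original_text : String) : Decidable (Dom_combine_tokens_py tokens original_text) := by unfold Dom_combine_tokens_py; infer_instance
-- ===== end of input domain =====

-- B replaces A's outer index loop with manual jumps plus inner extension loop by ONE flat pass
-- keeping a buffer of the current mergeable run (objective: simpler decomposition, same cost).
-- Equivalence is about the RETURN value; neither program mutates its arguments.

-- shared helpers (tok[k] on a token dict; f-string formatting of an Optional value)
def pvDget (t : List (String × Option String)) (k : String) : Option String :=
  ((PySem.Dict.mk t).get? k).getD none   -- tok[k]; the KeyError case (missing key) is excluded by Pre_

def pvWd (t : List (String × Option String)) : String := (pvDget t "word").getD ""  -- tok['word']; Pre_ guarantees a string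

def pvPs (t : List (String × Option String)) : Option String := pvDget t "POS"      -- tok['POS']; may be None

def pvFmt : Option String → String               -- f"{x}" on an Optional[str]
  | none => "None"
  | some s => s

-- ===== PORT A =====
-- inner while loop of A: extends (combined_word, combined_pos) over the remaining tokens,
-- returns the final accumulators and the remaining suffix (the while-index j is the position
-- where that suffix starts; 'j > i + 1' below is 'the suffix got shorter').
def pvInnerA (ol cw cp : String) : List (List (String × Option String)) → String × String × List (List (String × Option String))
  | [] => (cw, cp, [])
  | nt :: rest =>
    if pvPs nt = some "PUNCT" then (cw, cp, nt :: rest)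
    else
      if PySem.Str.isIn (PySem.Str.lower (cw ++ pvWd nt)) ol then
        pvInnerA ol (cw ++ pvWd nt) (cp ++ "+" ++ pvFmt (pvPs nt)) rest
      else (cw, cp, nt :: rest)

-- outer while loop of A over tokens[i:], with the Python result accumulator (reversed at the end)
def pvLoopA (ol : String) (result : List (List (String × Option String))) : List (List (String × Option String)) → List (List (String × Option String))
  | [] => result.reverse
  | current :: rest =>
    if pvPs current ≠ some "PUNCT" ∧ rest ≠ [] then
      -- r = (combined_word, combined_pos, tokens[j:]) of the inner loop
      if h : (pvInnerA ol (pvWd current) (pvFmt (pvPs current)) rest).2.2.length < rest.length then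
        -- 'j > i + 1': the inner loop consumed something — emit the merged dict, continue at j
        pvLoopA ol ([("word", some (pvInnerA ol (pvWd current) (pvFmt (pvPs current)) rest).1),
                     ("POS", some (pvInnerA ol (pvWd current) (pvFmt (pvPs current)) rest).2.1),
                     ("lemma", none)] :: result)
          (pvInnerA ol (pvWd current) (pvFmt (pvPs current)) rest).2.2
      else pvLoopA ol (current :: result) rest
    else pvLoopA ol (current :: result) rest
  termination_by l => l.length
  decreasing_by
    · simp only [List.length_cons]; omega
    · simp
    · simp

def combine_tokens_py (tokens : List (List (String × Option String))) (original_text : String) : List (List (String × Option String)) :=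
  if tokens = [] then [] else pvLoopA (PySem.Str.lower original_text) [] tokens

-- ===== PORT B =====
-- '+'.join(xs)
def pvJoinPlus : List String → String
  | [] => ""
  | h :: t => t.foldl (fun a s => a ++ "+" ++ s) h

-- flush(): emit nothing / the single original token / the merged dict
-- (the joined pieces are f"{t['POS']}", i.e. pvFmt of each POS value — exact also when it is None)
def pvFlush (buf : List (List (String × Option String))) (bw : String) : List (List (String × Option String)) :=
  match buf with
  | [] => []
  | [t] => [t]
  | _ => [[("word", some bw), ("POS", some (pvJoinPlus (buf.map fun t => pvFmt (pvPs t)))), ("lemma", none)]]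

-- the single for-loop of B over tokens, with (result, buf, buf_word) as state
def pvLoopB (ol : String) (result buf : List (List (String × Option String))) (bw : String) : List (List (String × Option String)) → List (List (String × Option String))
  | [] => result ++ pvFlush buf bw
  | t :: rest =>
    if pvPs t = some "PUNCT" then pvLoopB ol (result ++ pvFlush buf bw ++ [t]) [] "" rest
    else if buf = [] then pvLoopB ol result [t] (pvWd t) rest
    else if PySem.Str.isIn (PySem.Str.lower (bw ++ pvWd t)) ol then
      pvLoopB ol result (buf ++ [t]) (bw ++ pvWd t) rest
    else pvLoopB ol (result ++ pvFlush buf bw) [t] (pvWd t) rest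

def combine_tokens_py_alt (tokens : List (List (String × Option String))) (original_text : String) : List (List (String × Option String)) :=
  pvLoopB (PySem.Str.lower original_text) [] [] "" tokens

-- ===== PRECONDITION & SPEC =====
-- Pre_ excludes tokens with a missing 'word' or 'POS' key or a None 'word' value (A raises
-- KeyError / TypeError when it touches them, B always touches them) and tokens with duplicate
-- keys, unrepresentable in a Python dict so any behaviour there is accidental; see claim.json cites.
def pvNodupKeys : List String → Bool
  | [] => true
  | k :: rest => (!rest.contains k) && pvNodupKeys rest

def Pre_combine_tokens_py (tokens : List (List (String × Option String))) (original_text : String) : Prop :=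
  (tokens.all fun t => pvNodupKeys (t.map Prod.fst)
    && (t.any fun p => p.1 == "word" && p.2.isSome)
    && (t.any fun p => p.1 == "POS")) = true
instance (tokens : List (List (String × Option String))) (original_text : String) : Decidable (Pre_combine_tokens_py tokens original_text) := by unfold Pre_combine_tokens_py; infer_instance

def pvWitness_combine_tokens_py : (List (List (String × Option String))) × String :=
  ([[("word", some "na"), ("POS", some "N"), ("lemma", none)], [("word", some "sa"), ("POS", some "V"), ("lemma", none)]], "nasa ne")

def Spec_combine_tokens_py (tokens : List (List (String × Option String))) (original_text : String) (out : List (List (String × Option String))) : Prop := out = combine_tokens_py_alt tokens original_text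
instance (tokens : List (List (String × Option String))) (original_text : String) (out : List (List (String × Option String))) : Decidable (Spec_combine_tokens_py tokens original_text out) := by unfold Spec_combine_tokens_py; infer_instance

-- ===== CLAIM (what is proved, stated in full; the proofs are below) =====
def Claim_equal_combine_tokens_py : Prop := ∀ (tokens : List (List (String × Option String))) (original_text : String), Dom_combine_tokens_py tokens original_text → Pre_combine_tokens_py tokens original_text → Spec_combine_tokens_py tokens original_text (combine_tokens_py tokens original_text)

-- ===== LEMMAS AND PROOFS =====

-- B's loop accumulates its result by appending on the right
theorem pvLoopB_acc (ol : String) (l : List (List (String × Option String))) :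
    ∀ (res buf : List (List (String × Option String))) (bw : String),
      pvLoopB ol res buf bw l = res ++ pvLoopB ol [] buf bw l := by
  induction l with
  | nil => intro res buf bw; simp [pvLoopB]
  | cons t rest ih =>
    intro res buf bw
    simp only [pvLoopB]
    split_ifs <;> (conv_lhs => rw [ih]) <;> (conv_rhs => rw [ih]) <;> simp

theorem pvJoinPlus_append (l : List String) (x : String) (h : l ≠ []) :
    pvJoinPlus (l ++ [x]) = pvJoinPlus l ++ "+" ++ x := by
  cases l with
  | nil => exact absurd rfl h
  | cons a t => simp [pvJoinPlus, List.foldl_append]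

theorem pvInnerA_len (ol : String) : ∀ (l : List (List (String × Option String))) (cw cp : String),
    (pvInnerA ol cw cp l).2.2.length ≤ l.length := by
  intro l
  induction l with
  | nil => intro cw cp; simp [pvInnerA]
  | cons nt rest ih =>
    intro cw cp
    simp only [pvInnerA]
    split_ifs with h1 h2
    · simp
    · exact le_trans (ih _ _) (by simp)
    · simp

theorem pvInnerA_stall (ol : String) : ∀ (l : List (List (String × Option String))) (cw cp : String),
    ¬ (pvInnerA ol cw cp l).2.2.length < l.length → (pvInnerA ol cw cp l) = (cw, cp, l) := by
  intro l
  cases l with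
  | nil => intro cw cp _; simp [pvInnerA]
  | cons nt rest =>
    intro cw cp h
    by_cases h1 : pvPs nt = some "PUNCT"
    · simp only [pvInnerA, if_pos h1]
    · by_cases h2 : PySem.Str.isIn (PySem.Str.lower (cw ++ pvWd nt)) ol = true
      · exfalso
        apply h
        have hle := pvInnerA_len ol rest (cw ++ pvWd nt) (cp ++ "+" ++ pvFmt (pvPs nt))
        simp only [pvInnerA, if_neg h1, if_pos h2, List.length_cons]
        omega
      · simp only [pvInnerA, if_neg h1, if_neg h2]

-- the chain invariant: B running with a nonempty buffer computes exactly what A's inner loop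
-- computes from the buffer's combined word and joined POS string, then flushes and restarts
theorem pvB_chain (ol : String) : ∀ (rest buf : List (List (String × Option String))) (bw : String),
    buf ≠ [] →
    ∀ cw' cp' rem,
      pvInnerA ol bw (pvJoinPlus (buf.map fun t => pvFmt (pvPs t))) rest = (cw', cp', rem) →
      pvLoopB ol [] buf bw rest =
        (if rem.length < rest.length
         then [[("word", some cw'), ("POS", some cp'), ("lemma", none)]]
         else pvFlush buf bw) ++ pvLoopB ol [] [] "" rem := by
  intro rest
  induction rest with
  | nil =>
    intro buf bw hb cw' cp' rem heq
    simp only [pvInnerA, Prod.mk.injEq] at heq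
    obtain ⟨rfl, rfl, rfl⟩ := heq
    simp [pvLoopB, pvFlush]
  | cons t r ih =>
    intro buf bw hb cw' cp' rem heq
    by_cases h1 : pvPs t = some "PUNCT"
    · -- t is PUNCT: the inner loop stops here, B flushes and emits t
      simp only [pvInnerA, if_pos h1, Prod.mk.injEq] at heq
      obtain ⟨rfl, rfl, rfl⟩ := heq
      have hL : pvLoopB ol [] buf bw (t :: r) = pvFlush buf bw ++ [t] ++ pvLoopB ol [] [] "" r := by
        simp only [pvLoopB, if_pos h1]
        rw [pvLoopB_acc]; simp
      have hR : pvLoopB ol [] [] "" (t :: r) = [t] ++ pvLoopB ol [] [] "" r := by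
        simp only [pvLoopB, if_pos h1]
        rw [pvLoopB_acc]; simp [pvFlush]
      rw [hL, if_neg (lt_irrefl _), hR]
      simp
    · by_cases h2 : PySem.Str.isIn (PySem.Str.lower (bw ++ pvWd t)) ol = true
      · -- extension: both sides absorb t into the run
        simp only [pvInnerA, if_neg h1, if_pos h2] at heq
        have hjp : pvJoinPlus ((buf ++ [t]).map fun t => pvFmt (pvPs t))
            = pvJoinPlus (buf.map fun t => pvFmt (pvPs t)) ++ "+" ++ pvFmt (pvPs t) := by
          rw [List.map_append]
          exact pvJoinPlus_append _ _ (by simpa using hb)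
        have hlen : rem.length ≤ r.length := by
          have h := pvInnerA_len ol r (bw ++ pvWd t)
            (pvJoinPlus (buf.map fun t => pvFmt (pvPs t)) ++ "+" ++ pvFmt (pvPs t))
          rw [heq] at h; exact h
        have hL : pvLoopB ol [] buf bw (t :: r) = pvLoopB ol [] (buf ++ [t]) (bw ++ pvWd t) r := by
          simp only [pvLoopB, if_neg h1, if_neg hb, if_pos h2]
        rw [hL, ih (buf ++ [t]) (bw ++ pvWd t) (by simp) cw' cp' rem (by rw [hjp]; exact heq)]
        by_cases hc : rem.length < r.length
        · rw [if_pos hc, if_pos (show rem.length < (t :: r).length by simp only [List.length_cons]; omega)]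
        · -- the inner loop consumed nothing more; the buffer already has ≥ 2 tokens
          rw [if_neg hc, if_pos (show rem.length < (t :: r).length by simp only [List.length_cons]; omega)]
          have hst := pvInnerA_stall ol r (bw ++ pvWd t)
            (pvJoinPlus (buf.map fun t => pvFmt (pvPs t)) ++ "+" ++ pvFmt (pvPs t))
            (by rw [heq]; exact hc)
          rw [heq] at hst
          simp only [Prod.mk.injEq] at hst
          obtain ⟨rfl, rfl, rfl⟩ := hst
          obtain ⟨a, buf', rfl⟩ : ∃ a buf', buf = a :: buf' := by
            cases buf with
            | nil => exact absurd rfl hb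
            | cons a buf' => exact ⟨a, buf', rfl⟩
          have hflush : pvFlush ((a :: buf') ++ [t]) (bw ++ pvWd t)
              = [[("word", some (bw ++ pvWd t)),
                  ("POS", some (pvJoinPlus (((a :: buf') ++ [t]).map fun t => pvFmt (pvPs t)))),
                  ("lemma", none)]] := by
            cases buf' <;> rfl
          rw [hflush, hjp]
      · -- mismatch: the inner loop stops, B flushes and restarts at t
        simp only [pvInnerA, if_neg h1, if_neg h2, Prod.mk.injEq] at heq
        obtain ⟨rfl, rfl, rfl⟩ := heq
        have hL : pvLoopB ol [] buf bw (t :: r)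
            = pvFlush buf bw ++ pvLoopB ol [] [t] (pvWd t) r := by
          simp only [pvLoopB, if_neg h1, if_neg hb, if_neg h2]
          rw [pvLoopB_acc]; simp
        have hR : pvLoopB ol [] [] "" (t :: r) = pvLoopB ol [] [t] (pvWd t) r := by
          simp only [pvLoopB, if_neg h1]
          simp
        rw [hL, if_neg (lt_irrefl _), hR]

-- A's outer loop equals B's loop started with an empty buffer
theorem pvAB (ol : String) : ∀ (n : Nat) (l : List (List (String × Option String))),
    l.length ≤ n → ∀ res, pvLoopA ol res l = res.reverse ++ pvLoopB ol [] [] "" l := by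
  intro n
  induction n with
  | zero =>
    intro l hl res
    have : l = [] := List.eq_nil_of_length_eq_zero (Nat.le_zero.mp hl)
    subst this
    simp [pvLoopA, pvLoopB, pvFlush]
  | succ n ih =>
    intro l hl res
    cases l with
    | nil => simp [pvLoopA, pvLoopB, pvFlush]
    | cons c rest =>
      simp only [List.length_cons, Nat.succ_le_succ_iff] at hl
      by_cases hp : pvPs c = some "PUNCT"
      · -- PUNCT token: both emit it directly
        have hA : pvLoopA ol res (c :: rest) = pvLoopA ol (c :: res) rest := by
          simp only [pvLoopA]
          rw [if_neg (by simp [hp])]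
        have hB : pvLoopB ol [] [] "" (c :: rest) = [c] ++ pvLoopB ol [] [] "" rest := by
          simp only [pvLoopB, if_pos hp]
          rw [pvLoopB_acc]; simp [pvFlush]
        rw [hA, ih rest hl, hB]
        simp
      · cases rest with
        | nil =>
          -- last token, not PUNCT: emitted alone
          have hA : pvLoopA ol res (c :: []) = pvLoopA ol (c :: res) [] := by
            simp only [pvLoopA]
            rw [if_neg (by simp)]
          rw [hA]
          simp [pvLoopA, pvLoopB, pvFlush, hp]
        | cons t r =>
          -- non-PUNCT with a successor: A runs the inner loop, B starts a run buffer at c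
          rcases hE : pvInnerA ol (pvWd c) (pvFmt (pvPs c)) (t :: r) with ⟨cw', cp', rem⟩
          have hlen : rem.length ≤ (t :: r).length := by
            have h := pvInnerA_len ol (t :: r) (pvWd c) (pvFmt (pvPs c))
            rw [hE] at h; exact h
          have hB : pvLoopB ol [] [] "" (c :: t :: r) = pvLoopB ol [] [c] (pvWd c) (t :: r) := by
            simp only [pvLoopB, if_neg hp]
            simp
          have hchain := pvB_chain ol (t :: r) [c] (pvWd c) (by simp) cw' cp' rem
            (by simpa [pvJoinPlus] using hE)
          have hA : pvLoopA ol res (c :: t :: r)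
              = if rem.length < (t :: r).length
                then pvLoopA ol ([("word", some cw'), ("POS", some cp'), ("lemma", none)] :: res) rem
                else pvLoopA ol (c :: res) (t :: r) := by
            simp only [pvLoopA]
            rw [if_pos ⟨hp, by simp⟩]
            rw [hE]    -- the inner-loop result
            simp only [dite_eq_ite]
          rw [hA, hB, hchain]
          by_cases hc : rem.length < (t :: r).length
          · rw [if_pos hc, if_pos hc, ih rem (by simp only [List.length_cons] at hlen; omega)]
            simp
          · have hrem : rem = t :: r := by
              have hst := pvInnerA_stall ol (t :: r) (pvWd c) (pvFmt (pvPs c)) (by rw [hE]; exact hc)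
              rw [hE] at hst
              simp only [Prod.mk.injEq] at hst
              exact hst.2.2
            rw [if_neg hc, if_neg hc, hrem, ih (t :: r) hl]
            simp [pvFlush]

-- ===== VERDICT (by name: the statement is the Claim_ definition above) =====
theorem combine_tokens_py_spec : Claim_equal_combine_tokens_py := by
  intro tokens original_text _ _
  unfold Spec_combine_tokens_py combine_tokens_py combine_tokens_py_alt
  by_cases h : tokens = []
  · subst h; simp [pvLoopB, pvFlush]
  · rw [if_neg h, pvAB (PySem.Str.lower original_text) tokens.length tokens le_rfl []]
    simp
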